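-- pv_equiv track=rewrite | github.com/hojoon123/PythonAlgorithems | 5.완탐/2022/221207_BJOBF/BJO3085.py | Check
-- ===== SOURCE A (Python) =====
-- def Check(arr):
--     N = len(arr)
--     answer = 0
--
--     for i in range(N):
--         cnt = 1
--         for j in range(1,N):
--             if arr[i][j] == arr[i][j-1]:
--                 cnt += 1
--             else:
--                 cnt = 1
--             if cnt > answer:
--                 answer = cnt
--
--         cnt = 1
--         for j in range(1,N):
--             if arr[j][i] == arr[j-1][i]:
--                 cnt += 1
--             else:
--                 cnt = 1
--             if cnt > answer:
--                 answer = cnt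
--     return answer
-- ===== SOURCE B (Python) =====
-- def Check(arr):
--     # One combined pass over all cells: a horizontal run scalar per row and a
--     # per-column vertical run table maintained across rows.
--     N = len(arr)
--     answer = 0
--     col_run = [1] * N
--     for i in range(N):
--         horiz = 1
--         for j in range(N):
--             if j > 0:
--                 horiz = horiz + 1 if arr[i][j] == arr[i][j - 1] else 1
--                 if horiz > answer:
--                     answer = horiz
--             if i > 0:
--                 col_run[j] = col_run[j] + 1 if arr[i][j] == arr[i - 1][j] else 1
--                 if col_run[j] > answer:
--                     answer = col_run[j]
--     return answer
-- ===== Notes on version B (the rewrite author's own statement) =====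
-- stated objective: alternative
-- what changed: Replaces A's two separate directional scans per index (a row pass and a column pass, each restarting a scalar run counter) by a single combined pass over all cells that maintains one horizontal run scalar per row and a per-column vertical run table carried across rows.
import Mathlib
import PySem

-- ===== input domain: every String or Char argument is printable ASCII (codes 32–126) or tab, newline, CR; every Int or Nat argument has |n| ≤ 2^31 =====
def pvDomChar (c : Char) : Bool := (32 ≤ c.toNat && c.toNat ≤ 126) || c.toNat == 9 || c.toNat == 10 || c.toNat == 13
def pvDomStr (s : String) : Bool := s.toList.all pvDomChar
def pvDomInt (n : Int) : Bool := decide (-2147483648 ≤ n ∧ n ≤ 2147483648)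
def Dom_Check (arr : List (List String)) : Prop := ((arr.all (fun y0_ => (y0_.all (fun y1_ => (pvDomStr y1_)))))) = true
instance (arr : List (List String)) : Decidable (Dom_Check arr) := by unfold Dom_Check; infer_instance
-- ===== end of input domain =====

-- B replaces A's two separate directional scans per index by one combined pass over all
-- cells that keeps a horizontal run scalar per row and a per-column vertical run table
-- carried across rows (alternative decomposition, same asymptotic cost).

-- ===== PORT A =====
-- arr[i][j]; all indices used by either program are nonnegative, and Pre_Check keeps
-- them in range, so the defaults of pyGetD are never consulted on admitted inputs.
def pvCell (arr : List (List String)) (i j : Int) : String :=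
  PySem.List.pyGetD (PySem.List.pyGetD arr i []) j ""

def Check (arr : List (List String)) : Int :=
  let N : Int := PySem.List.len arr
  (PySem.List.pyRange 0 N 1).foldl (fun answer i =>
    let s1 := (PySem.List.pyRange 1 N 1).foldl (fun (st : Int × Int) j =>
      let cnt := if pvCell arr i j == pvCell arr i (j - 1) then st.1 + 1 else 1
      (cnt, if cnt > st.2 then cnt else st.2)) (1, answer)
    let s2 := (PySem.List.pyRange 1 N 1).foldl (fun (st : Int × Int) j =>
      let cnt := if pvCell arr j i == pvCell arr (j - 1) i then st.1 + 1 else 1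
      (cnt, if cnt > st.2 then cnt else st.2)) (1, s1.2)
    s2.2) 0

-- ===== PORT B =====
-- state of the outer loop: (col_run, answer); of the inner loop: (horiz, col_run, answer)
def Check_alt (arr : List (List String)) : Int :=
  let N : Int := PySem.List.len arr
  let res := (PySem.List.pyRange 0 N 1).foldl (fun (st : List Int × Int) i =>
    let inner := (PySem.List.pyRange 0 N 1).foldl (fun (q : Int × List Int × Int) j =>
      let p1 : Int × Int :=
        if 0 < j then
          let h := if pvCell arr i j == pvCell arr i (j - 1) then q.1 + 1 else 1
          (h, if h > q.2.2 then h else q.2.2)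
        else (q.1, q.2.2)
      let p2 : List Int × Int :=
        if 0 < i then
          let c := if pvCell arr i j == pvCell arr (i - 1) j then PySem.List.pyGetD q.2.1 j 0 + 1 else 1
          (PySem.List.pySetD q.2.1 j c, if c > p1.2 then c else p1.2)
        else (q.2.1, p1.2)
      (p1.1, p2.1, p2.2)) (1, st.1, st.2)
    (inner.2.1, inner.2.2)) (List.replicate arr.length 1, 0)
  res.2

-- ===== PRECONDITION & SPEC =====
-- Pre_Check excludes exactly the inputs on which the Python A raises IndexError:
-- grids with at least two rows in which some row is shorter than the number of rows.
def Pre_Check (arr : List (List String)) : Prop :=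
  arr.length ≤ 1 ∨ ∀ row ∈ arr, arr.length ≤ row.length

instance (arr : List (List String)) : Decidable (Pre_Check arr) := by
  unfold Pre_Check; infer_instance

def pvWitness_Check : List (List String) := [["a", "a"], ["a", "b"]]

def Spec_Check (arr : List (List String)) (out : Int) : Prop := out = Check_alt arr
instance (arr : List (List String)) (out : Int) : Decidable (Spec_Check arr out) := by
  unfold Spec_Check; infer_instance

-- ===== CLAIM (what is proved, stated in full; the proofs are below) =====
def Claim_equal_Check : Prop := ∀ (arr : List (List String)), Dom_Check arr → Pre_Check arr → Spec_Check arr (Check arr)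

-- ===== LEMMAS AND PROOFS =====

-- nat-indexed cell access (agrees with pvCell on nonnegative indices)
def gcell (arr : List (List String)) (i j : Nat) : String := (arr.getD i []).getD j ""

-- length of the horizontal run of equal cells ending at (i, j)
def runH (arr : List (List String)) (i : Nat) : Nat → Int
  | 0 => 1
  | j + 1 => if gcell arr i (j + 1) == gcell arr i j then runH arr i j + 1 else 1

-- length of the vertical run of equal cells in column j ending at row i
def runV (arr : List (List String)) (j : Nat) : Nat → Int
  | 0 => 1
  | i + 1 => if gcell arr (i + 1) j == gcell arr i j then runV arr j i + 1 else 1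

-- the run values A's two inner loops at outer index i fold a max over
def rowvalsA (arr : List (List String)) (i : Nat) : List Int :=
  (List.range (arr.length - 1)).map (fun k => runH arr i (k + 1))
def colvalsA (arr : List (List String)) (i : Nat) : List Int :=
  (List.range (arr.length - 1)).map (fun k => runV arr i (k + 1))

-- the run values B's combined inner loop produces at cell (i, j), and per row
def bvalsAt (arr : List (List String)) (i j : Nat) : List Int :=
  (if 0 < j then [runH arr i j] else []) ++ (if 0 < i then [runV arr j i] else [])
def bvals (arr : List (List String)) (i : Nat) : List Int :=
  (List.range arr.length).flatMap (bvalsAt arr i)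

theorem if_lt_eq_max (a b : Int) : (if a < b then b else a) = max a b := by
  rcases le_total b a with h | h
  · rw [if_neg (not_lt.mpr h), max_eq_left h]
  · rcases lt_or_eq_of_le h with h' | h'
    · rw [if_pos h', max_eq_right h]
    · subst h'; simp

theorem pvCell_natCast (arr : List (List String)) (i j : Nat) :
    pvCell arr (i : Int) (j : Int) = gcell arr i j := by
  simp [pvCell, gcell, PySem.List.pyGetD_natCast]

-- A's scalar run loop, in nat form
theorem scalar_loop (r : Nat → Int) (c : Nat → Bool)
    (hr : ∀ k, r (k + 1) = if c k then r k + 1 else 1) :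
    ∀ (m : Nat) (a : Int),
      (List.range m).foldl (fun (st : Int × Int) k =>
          let cnt := if c k then st.1 + 1 else 1
          (cnt, if cnt > st.2 then cnt else st.2)) (r 0, a)
        = (r m, (List.range m).foldl (fun acc k => max acc (r (k + 1))) a) := by
  intro m a
  induction m with
  | zero => simp
  | succ m ih =>
    rw [List.range_succ, List.foldl_append, List.foldl_append, ih]
    simp only [List.foldl_cons, List.foldl_nil, ← hr m]
    simp only [gt_iff_lt, if_lt_eq_max]

theorem cond_castH (arr : List (List String)) (i k : Nat) :
    (pvCell arr (i : Int) (1 + (k : Int)) == pvCell arr (i : Int) (1 + (k : Int) - 1))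
      = (gcell arr i (k + 1) == gcell arr i k) := by
  have h1 : (1 + (k : Int)) = ((k + 1 : Nat) : Int) := by push_cast; ring
  have h2 : ((k + 1 : Nat) : Int) - 1 = ((k : Nat) : Int) := by push_cast; ring
  rw [h1, h2, pvCell_natCast, pvCell_natCast]

theorem cond_castV (arr : List (List String)) (i k : Nat) :
    (pvCell arr (1 + (k : Int)) (i : Int) == pvCell arr (1 + (k : Int) - 1) (i : Int))
      = (gcell arr (k + 1) i == gcell arr k i) := by
  have h1 : (1 + (k : Int)) = ((k + 1 : Nat) : Int) := by push_cast; ring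
  have h2 : ((k + 1 : Nat) : Int) - 1 = ((k : Nat) : Int) := by push_cast; ring
  rw [h1, h2, pvCell_natCast, pvCell_natCast]

theorem A_row_loop (arr : List (List String)) (i : Nat) (a : Int) :
    ((PySem.List.pyRange 1 (arr.length : Int) 1).foldl (fun (st : Int × Int) j =>
        let cnt := if pvCell arr (i : Int) j == pvCell arr (i : Int) (j - 1) then st.1 + 1 else 1
        (cnt, if cnt > st.2 then cnt else st.2)) (1, a))
      = (runH arr i (arr.length - 1), (rowvalsA arr i).foldl max a) := by
  rw [PySem.List.pyRange_one]
  have hn : ((arr.length : Int) - 1).toNat = arr.length - 1 := by omega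
  rw [hn, List.foldl_map]
  have hfun : ∀ (st : Int × Int), ∀ k ∈ List.range (arr.length - 1),
      (fun (st : Int × Int) (k : Nat) =>
        let cnt := if pvCell arr (i : Int) (1 + (k : Int)) == pvCell arr (i : Int) (1 + (k : Int) - 1)
          then st.1 + 1 else 1
        (cnt, if cnt > st.2 then cnt else st.2)) st k
      = (fun (st : Int × Int) (k : Nat) =>
        let cnt := if gcell arr i (k + 1) == gcell arr i k then st.1 + 1 else 1
        (cnt, if cnt > st.2 then cnt else st.2)) st k := by
    intro st k _
    simp only [cond_castH]
  rw [List.foldl_ext _ _ _ hfun]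
  rw [rowvalsA, List.foldl_map]
  exact scalar_loop (runH arr i) (fun k => gcell arr i (k + 1) == gcell arr i k)
    (fun k => rfl) (arr.length - 1) a

theorem A_col_loop (arr : List (List String)) (i : Nat) (a : Int) :
    ((PySem.List.pyRange 1 (arr.length : Int) 1).foldl (fun (st : Int × Int) j =>
        let cnt := if pvCell arr j (i : Int) == pvCell arr (j - 1) (i : Int) then st.1 + 1 else 1
        (cnt, if cnt > st.2 then cnt else st.2)) (1, a))
      = (runV arr i (arr.length - 1), (colvalsA arr i).foldl max a) := by
  rw [PySem.List.pyRange_one]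
  have hn : ((arr.length : Int) - 1).toNat = arr.length - 1 := by omega
  rw [hn, List.foldl_map]
  have hfun : ∀ (st : Int × Int), ∀ k ∈ List.range (arr.length - 1),
      (fun (st : Int × Int) (k : Nat) =>
        let cnt := if pvCell arr (1 + (k : Int)) (i : Int) == pvCell arr (1 + (k : Int) - 1) (i : Int)
          then st.1 + 1 else 1
        (cnt, if cnt > st.2 then cnt else st.2)) st k
      = (fun (st : Int × Int) (k : Nat) =>
        let cnt := if gcell arr (k + 1) i == gcell arr k i then st.1 + 1 else 1
        (cnt, if cnt > st.2 then cnt else st.2)) st k := by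
    intro st k _
    simp only [cond_castV]
  rw [List.foldl_ext _ _ _ hfun]
  rw [colvalsA, List.foldl_map]
  exact scalar_loop (runV arr i) (fun k => gcell arr (k + 1) i == gcell arr k i)
    (fun k => rfl) (arr.length - 1) a

-- A's whole computation as a fold of max over explicit run-value lists
theorem Check_eq (arr : List (List String)) :
    Check arr
      = (List.range arr.length).foldl
          (fun a i => (rowvalsA arr i ++ colvalsA arr i).foldl max a) 0 := by
  unfold Check
  simp only [PySem.List.len_eq, PySem.List.pyRange_zero_natCast, List.foldl_map]
  refine List.foldl_ext _ _ _ ?_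
  intro a i hi
  simp only [A_row_loop, A_col_loop, List.foldl_append]

-- the nat-level step of B's inner loop
def stepB (arr : List (List String)) (i : Nat) (q : Int × List Int × Int) (j : Nat) :
    Int × List Int × Int :=
  let p1 : Int × Int :=
    if 0 < j then
      let h := if gcell arr i j == gcell arr i (j - 1) then q.1 + 1 else 1
      (h, if h > q.2.2 then h else q.2.2)
    else (q.1, q.2.2)
  let p2 : List Int × Int :=
    if 0 < i then
      let c := if gcell arr i j == gcell arr (i - 1) j then (q.2.1).getD j 0 + 1 else 1
      ((q.2.1).set j c, if c > p1.2 then c else p1.2)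
    else (q.2.1, p1.2)
  (p1.1, p2.1, p2.2)

-- the column table after the first m cells of row i have been processed
def ctab (arr : List (List String)) (i m : Nat) : List Int :=
  (List.range arr.length).map (fun t => if t < m then runV arr t i else runV arr t (i - 1))

theorem ctab_zero (arr : List (List String)) (i : Nat) :
    ctab arr i 0 = (List.range arr.length).map (fun t => runV arr t (i - 1)) := by
  simp [ctab]

theorem ctab_getD (arr : List (List String)) (i m : Nat) (hm : m < arr.length) :
    (ctab arr i m).getD m 0 = runV arr m (i - 1) := by
  have hlen : m < ((List.range arr.length).map
      (fun t => if t < m then runV arr t i else runV arr t (i - 1))).length := by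
    simp [hm]
  rw [ctab, List.getD_eq_getElem _ _ hlen]
  simp

theorem ctab_set (arr : List (List String)) (i m : Nat) (hm : m < arr.length) :
    (ctab arr i m).set m (runV arr m i) = ctab arr i (m + 1) := by
  apply List.ext_getElem
  · simp [ctab]
  · intro t h1 h2
    have ht : t < arr.length := by simpa [ctab] using h2
    rw [List.getElem_set]
    by_cases hteq : m = t
    · subst hteq
      simp [ctab]
    · simp only [if_neg hteq, ctab, List.getElem_map, List.getElem_range]
      by_cases htm : t < m
      · rw [if_pos htm, if_pos (by omega)]
      · rw [if_neg htm, if_neg (by omega)]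

theorem ctab_succ_zero (arr : List (List String)) (m : Nat) :
    ctab arr 0 (m + 1) = ctab arr 0 m := by
  apply List.map_congr_left
  intro t _
  split_ifs <;> rfl

theorem B_inner_aux (arr : List (List String)) (i : Nat) :
    ∀ (m : Nat), m ≤ arr.length → ∀ (a : Int),
      (List.range m).foldl (stepB arr i) (1, ctab arr i 0, a)
        = ((if m = 0 then 1 else runH arr i (m - 1)), ctab arr i m,
            ((List.range m).flatMap (bvalsAt arr i)).foldl max a) := by
  intro m
  induction m with
  | zero => simp
  | succ m ih =>
    intro hm a
    rw [List.range_succ, List.foldl_append, ih (by omega) a, List.foldl_cons, List.foldl_nil,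
      List.flatMap_append, List.foldl_append]
    have hmn : m < arr.length := by omega
    simp only [List.flatMap_cons, List.flatMap_nil, List.append_nil]
    cases m with
    | zero =>
      cases i with
      | zero =>
        simp [stepB, bvalsAt, ctab_succ_zero, runH]
      | succ i' =>
        simp only [stepB, bvalsAt, if_neg (lt_irrefl 0), if_pos (Nat.succ_pos i'),
          ctab_getD arr (i' + 1) 0 hmn, Nat.add_sub_cancel]
        rw [show (if (gcell arr (i' + 1) 0 == gcell arr i' 0) then runV arr 0 i' + 1 else 1)
            = runV arr 0 (i' + 1) from rfl,
          ctab_set arr (i' + 1) 0 hmn]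
        simp [runH, gt_iff_lt, if_lt_eq_max]
    | succ m' =>
      cases i with
      | zero =>
        simp only [stepB, bvalsAt, if_pos (Nat.succ_pos m'), if_neg (lt_irrefl 0),
          if_neg (Nat.succ_ne_zero m'), Nat.add_sub_cancel]
        rw [show (if (gcell arr 0 (m' + 1) == gcell arr 0 m') then runH arr 0 m' + 1 else 1)
            = runH arr 0 (m' + 1) from rfl]
        simp [ctab_succ_zero, gt_iff_lt, if_lt_eq_max]
      | succ i' =>
        simp only [stepB, bvalsAt, if_pos (Nat.succ_pos m'), if_pos (Nat.succ_pos i'),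
          if_neg (Nat.succ_ne_zero m'), ctab_getD arr (i' + 1) (m' + 1) hmn, Nat.add_sub_cancel]
        rw [show (if (gcell arr (i' + 1) (m' + 1) == gcell arr i' (m' + 1))
              then runV arr (m' + 1) i' + 1 else 1) = runV arr (m' + 1) (i' + 1) from rfl,
          show (if (gcell arr (i' + 1) (m' + 1) == gcell arr (i' + 1) m')
              then runH arr (i' + 1) m' + 1 else 1) = runH arr (i' + 1) (m' + 1) from rfl,
          ctab_set arr (i' + 1) (m' + 1) hmn]
        simp only [gt_iff_lt, if_lt_eq_max, List.cons_append, List.nil_append,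
          List.foldl_cons, List.foldl_nil]
        rw [max_assoc]
        simp

theorem ctab_full (arr : List (List String)) (i : Nat) :
    ctab arr i arr.length = (List.range arr.length).map (fun t => runV arr t i) := by
  apply List.map_congr_left
  intro t ht
  rw [if_pos (List.mem_range.mp ht)]

-- B's inner step as it appears in the port, at nonnegative (cast) indices
theorem stepB_cast (arr : List (List String)) (i k : Nat) (q : Int × List Int × Int) :
    (let p1 : Int × Int :=
        if 0 < (k : Int) then
          let h := if pvCell arr (i : Int) (k : Int) == pvCell arr (i : Int) ((k : Int) - 1)
            then q.1 + 1 else 1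
          (h, if h > q.2.2 then h else q.2.2)
        else (q.1, q.2.2)
      let p2 : List Int × Int :=
        if 0 < (i : Int) then
          let c := if pvCell arr (i : Int) (k : Int) == pvCell arr ((i : Int) - 1) (k : Int)
            then PySem.List.pyGetD q.2.1 (k : Int) 0 + 1 else 1
          (PySem.List.pySetD q.2.1 (k : Int) c, if c > p1.2 then c else p1.2)
        else (q.2.1, p1.2)
      ((p1.1, p2.1, p2.2) : Int × List Int × Int))
      = stepB arr i q k := by
  have hk : ∀ (h0 : 0 < k), ((k : Int) - 1) = ((k - 1 : Nat) : Int) := by intro h0; omega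
  have hi : ∀ (h0 : 0 < i), ((i : Int) - 1) = ((i - 1 : Nat) : Int) := by intro h0; omega
  simp only [stepB]
  by_cases h0 : 0 < k
  · by_cases hi0 : 0 < i
    · simp only [if_pos h0, if_pos hi0, if_pos (by exact_mod_cast h0 : (0 : Int) < (k : Int)),
        if_pos (by exact_mod_cast hi0 : (0 : Int) < (i : Int)), hk h0, hi hi0,
        pvCell_natCast, PySem.List.pyGetD_natCast, PySem.List.pySetD_natCast]
    · have hi' : i = 0 := by omega
      subst hi'
      simp only [if_pos h0, if_neg (lt_irrefl 0), if_pos (by exact_mod_cast h0 : (0 : Int) < (k : Int)),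
        if_neg (by simp : ¬(0 : Int) < ((0 : Nat) : Int)), hk h0, pvCell_natCast]
  · have hk' : k = 0 := by omega
    subst hk'
    by_cases hi0 : 0 < i
    · simp only [if_neg (lt_irrefl 0), if_pos hi0,
        if_neg (by simp : ¬(0 : Int) < ((0 : Nat) : Int)),
        if_pos (by exact_mod_cast hi0 : (0 : Int) < (i : Int)), hi hi0,
        pvCell_natCast, PySem.List.pyGetD_natCast, PySem.List.pySetD_natCast]
    · have hi' : i = 0 := by omega
      subst hi'
      simp only [if_neg (lt_irrefl 0), if_neg (by simp : ¬(0 : Int) < ((0 : Nat) : Int))]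

-- B's outer step in nat form
def outerB (arr : List (List String)) (st : List Int × Int) (i : Nat) : List Int × Int :=
  let inner := (List.range arr.length).foldl (stepB arr i) (1, st.1, st.2)
  (inner.2.1, inner.2.2)

theorem B_outer (arr : List (List String)) :
    ∀ (k : Nat),
      (List.range k).foldl (outerB arr) (List.replicate arr.length 1, 0)
        = ((List.range arr.length).map (fun t => runV arr t (k - 1)),
            (List.range k).foldl (fun a i => (bvals arr i).foldl max a) 0) := by
  intro k
  induction k with
  | zero =>
    simp [runV]
  | succ k ih =>
    rw [List.range_succ, List.foldl_append, List.foldl_append, ih,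
      List.foldl_cons, List.foldl_nil, List.foldl_cons, List.foldl_nil]
    rw [← ctab_zero arr k]
    simp only [outerB]
    rw [B_inner_aux arr k arr.length le_rfl _, ctab_full]
    simp [bvals]

theorem Check_alt_eq (arr : List (List String)) :
    Check_alt arr
      = (List.range arr.length).foldl (fun a i => (bvals arr i).foldl max a) 0 := by
  unfold Check_alt
  simp only [PySem.List.len_eq, PySem.List.pyRange_zero_natCast, List.foldl_map]
  have hext : ∀ (st : List Int × Int), ∀ i ∈ List.range arr.length,
      (fun (st : List Int × Int) (i : Nat) =>
        let inner := (List.range arr.length).foldl (fun (q : Int × List Int × Int) (k : Nat) =>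
          let p1 : Int × Int :=
            if 0 < (k : Int) then
              let h := if pvCell arr (i : Int) (k : Int) == pvCell arr (i : Int) ((k : Int) - 1)
                then q.1 + 1 else 1
              (h, if h > q.2.2 then h else q.2.2)
            else (q.1, q.2.2)
          let p2 : List Int × Int :=
            if 0 < (i : Int) then
              let c := if pvCell arr (i : Int) (k : Int) == pvCell arr ((i : Int) - 1) (k : Int)
                then PySem.List.pyGetD q.2.1 (k : Int) 0 + 1 else 1
              (PySem.List.pySetD q.2.1 (k : Int) c, if c > p1.2 then c else p1.2)
            else (q.2.1, p1.2)
          (p1.1, p2.1, p2.2)) (1, st.1, st.2)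
        ((inner.2.1, inner.2.2) : List Int × Int)) st i
      = outerB arr st i := by
    intro st i _
    simp only [outerB]
    rw [List.foldl_ext _ _ _ (fun q k _ => stepB_cast arr i k q)]
  rw [List.foldl_ext _ _ _ hext, B_outer]

theorem foldl_max_flatMap (f : Nat → List Int) (n : Nat) (a : Int) :
    (List.range n).foldl (fun acc i => (f i).foldl max acc) a
      = ((List.range n).flatMap f).foldl max a := by
  induction n with
  | zero => simp
  | succ n ih => simp [List.range_succ, List.foldl_append, ih]

theorem foldl_max_eq_of_sub (l1 l2 : List Int) (a : Int)
    (h12 : ∀ y ∈ l1, y ∈ l2) (h21 : ∀ y ∈ l2, y ∈ l1) :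
    l1.foldl max a = l2.foldl max a := by
  apply le_antisymm
  · rcases PySem.List.foldl_max_mem l1 a with h | h
    · rw [h]; exact (PySem.List.le_foldl_max l2 a).1
    · exact (PySem.List.le_foldl_max l2 a).2 _ (h12 _ h)
  · rcases PySem.List.foldl_max_mem l2 a with h | h
    · rw [h]; exact (PySem.List.le_foldl_max l1 a).1
    · exact (PySem.List.le_foldl_max l1 a).2 _ (h21 _ h)

theorem mem_LA_LB (arr : List (List String)) :
    ∀ y ∈ (List.range arr.length).flatMap (fun i => rowvalsA arr i ++ colvalsA arr i),
      y ∈ (List.range arr.length).flatMap (bvals arr) := by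
  intro y hy
  obtain ⟨i, hi, hcase⟩ := List.mem_flatMap.mp hy
  have hin : i < arr.length := List.mem_range.mp hi
  rcases List.mem_append.mp hcase with h | h
  · obtain ⟨k, hk, rfl⟩ := List.mem_map.mp h
    have hkn : k < arr.length - 1 := List.mem_range.mp hk
    refine List.mem_flatMap.mpr ⟨i, hi, ?_⟩
    refine List.mem_flatMap.mpr ⟨k + 1, List.mem_range.mpr (by omega), ?_⟩
    exact List.mem_append_left _ (by simp)
  · obtain ⟨k, hk, rfl⟩ := List.mem_map.mp h
    have hkn : k < arr.length - 1 := List.mem_range.mp hk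
    refine List.mem_flatMap.mpr ⟨k + 1, List.mem_range.mpr (by omega), ?_⟩
    refine List.mem_flatMap.mpr ⟨i, List.mem_range.mpr hin, ?_⟩
    exact List.mem_append_right _ (by simp)

theorem mem_LB_LA (arr : List (List String)) :
    ∀ y ∈ (List.range arr.length).flatMap (bvals arr),
      y ∈ (List.range arr.length).flatMap (fun i => rowvalsA arr i ++ colvalsA arr i) := by
  intro y hy
  obtain ⟨i, hi, hb⟩ := List.mem_flatMap.mp hy
  have hin : i < arr.length := List.mem_range.mp hi
  obtain ⟨j, hj, hat⟩ := List.mem_flatMap.mp hb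
  have hjn : j < arr.length := List.mem_range.mp hj
  rw [bvalsAt] at hat
  rcases List.mem_append.mp hat with h | h
  · by_cases h0 : 0 < j
    · rw [if_pos h0] at h
      rw [List.mem_singleton.mp h]
      refine List.mem_flatMap.mpr ⟨i, hi, ?_⟩
      apply List.mem_append_left
      refine List.mem_map.mpr ⟨j - 1, List.mem_range.mpr (by omega), ?_⟩
      exact congrArg (runH arr i) (Nat.sub_add_cancel h0)
    · rw [if_neg h0] at h
      cases h
  · by_cases h0 : 0 < i
    · rw [if_pos h0] at h
      rw [List.mem_singleton.mp h]
      refine List.mem_flatMap.mpr ⟨j, hj, ?_⟩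
      apply List.mem_append_right
      refine List.mem_map.mpr ⟨i - 1, List.mem_range.mpr (by omega), ?_⟩
      exact congrArg (runV arr j) (Nat.sub_add_cancel h0)
    · rw [if_neg h0] at h
      cases h

-- ===== VERDICT (by name: the statement is the Claim_ definition above) =====
theorem Check_spec : Claim_equal_Check := by
  intro arr _ _
  unfold Spec_Check
  rw [Check_eq, Check_alt_eq,
    foldl_max_flatMap (fun i => rowvalsA arr i ++ colvalsA arr i) arr.length 0,
    foldl_max_flatMap (bvals arr) arr.length 0]
  exact foldl_max_eq_of_sub _ _ 0 (mem_LA_LB arr) (mem_LB_LA arr)
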